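-- pv_equiv track=rewrite | github.com/uripeled2/FourInARow | environment.py | check_win_in_row
-- ===== SOURCE A (Python) =====
-- def check_win_in_row(line, turn, win_amount=4):
--     count = 0
--     for c in range(len(line)):
--         if line[c] == turn:
--             count += 1
--             if count >= win_amount:
--                 return True
--         else:
--             count = 0
--     return False
-- ===== SOURCE B (Python) =====
-- def check_win_in_row(line, turn, win_amount=4):
--     blockers = [-1] + [i for i, v in enumerate(line) if v != turn] + [len(line)]
--     return any(b - a - 1 > 0 and b - a - 1 >= win_amount
--                for a, b in zip(blockers, blockers[1:]))
-- ===== Notes on version B (the rewrite author's own statement) =====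
-- stated objective: alternative
-- what changed: Instead of a running-counter scan with reset and early return, B builds the list of indices of all non-turn cells bracketed by sentinels -1 and len(line), and tests whether some pair of consecutive blockers encloses a positive gap of at least win_amount cells.
import Mathlib
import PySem

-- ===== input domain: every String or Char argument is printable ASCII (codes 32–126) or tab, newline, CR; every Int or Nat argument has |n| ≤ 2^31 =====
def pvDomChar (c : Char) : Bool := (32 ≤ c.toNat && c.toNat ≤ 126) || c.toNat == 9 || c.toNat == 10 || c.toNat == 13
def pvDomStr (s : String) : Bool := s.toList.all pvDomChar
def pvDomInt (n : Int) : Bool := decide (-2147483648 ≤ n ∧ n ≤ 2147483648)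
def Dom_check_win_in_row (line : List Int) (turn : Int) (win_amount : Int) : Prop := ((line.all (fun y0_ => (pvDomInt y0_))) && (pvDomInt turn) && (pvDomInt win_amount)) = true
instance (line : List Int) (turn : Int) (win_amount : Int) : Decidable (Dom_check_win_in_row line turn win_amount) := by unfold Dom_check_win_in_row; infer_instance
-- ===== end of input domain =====

-- B replaces A's running-counter scan by a staged blocker-index decomposition (indices of non-turn cells with sentinels, then pairwise gap test); alternative, same cost.


-- ===== PORT A =====
-- loop over the line carrying the running count; early return on count >= win_amount
def checkGo (turn win_amount : Int) : List Int → Int → Bool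
  | [], _ => false
  | c :: rest, count =>
    if c = turn then
      if count + 1 ≥ win_amount then true else checkGo turn win_amount rest (count + 1)
    else
      checkGo turn win_amount rest 0

def check_win_in_row (line : List Int) (turn : Int) (win_amount : Int) : Bool :=
  checkGo turn win_amount line 0

-- ===== PORT B =====
-- transliterates the comprehension [i for i, v in enumerate(line) if v != turn]
def blockerIdxs (turn : Int) : List Int → Int → List Int
  | [], _ => []
  | x :: xs, i => if x ≠ turn then i :: blockerIdxs turn xs (i + 1) else blockerIdxs turn xs (i + 1)

def check_win_in_row_alt (line : List Int) (turn : Int) (win_amount : Int) : Bool :=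
  let bl : List Int := -1 :: (blockerIdxs turn line 0 ++ [(line.length : Int)])
  (bl.zip bl.tail).any (fun p => decide (0 < p.2 - p.1 - 1) && decide (win_amount ≤ p.2 - p.1 - 1))

-- ===== PRECONDITION & SPEC =====
def Spec_check_win_in_row (line : List Int) (turn : Int) (win_amount : Int) (out : Bool) : Prop := out = check_win_in_row_alt line turn win_amount
instance (line : List Int) (turn : Int) (win_amount : Int) (out : Bool) : Decidable (Spec_check_win_in_row line turn win_amount out) := by unfold Spec_check_win_in_row; infer_instance

-- ===== CLAIM (what is proved, stated in full; the proofs are below) =====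
def Claim_equal_check_win_in_row : Prop := ∀ (line : List Int) (turn : Int) (win_amount : Int), Dom_check_win_in_row line turn win_amount → Spec_check_win_in_row line turn win_amount (check_win_in_row line turn win_amount)

-- ===== LEMMAS AND PROOFS =====

-- the pairwise-gap test of B, written as a recursion carrying the previous blocker
def zipAny (win_amount : Int) : List Int → Int → Bool
  | [], _ => false
  | b :: rest, prev =>
    (decide (0 < b - prev - 1) && decide (win_amount ≤ b - prev - 1)) || zipAny win_amount rest b

theorem zip_any_eq_zipAny (win_amount : Int) (l : List Int) :
    ∀ prev : Int,
      ((prev :: l).zip l).any (fun p => decide (0 < p.2 - p.1 - 1) && decide (win_amount ≤ p.2 - p.1 - 1))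
        = zipAny win_amount l prev := by
  induction l with
  | nil => intro prev; simp [zipAny]
  | cons b rest ih =>
    intro prev
    simp only [List.zip_cons_cons, List.any_cons, zipAny, ih b]

theorem blockerIdxs_ge (turn : Int) (xs : List Int) :
    ∀ (i b : Int), b ∈ blockerIdxs turn xs i → i ≤ b := by
  induction xs with
  | nil => intro i b h; simp [blockerIdxs] at h
  | cons x xs ih =>
    intro i b h
    by_cases hx : x = turn
    · simp [blockerIdxs, hx] at h
      have := ih (i + 1) b h; omega
    · simp [blockerIdxs, hx] at h
      rcases h with h | h
      · omega
      · have := ih (i + 1) b h; omega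

-- once the pending run already reaches win_amount, B's remaining gap test is true
theorem zipAny_big (turn win_amount : Int) (xs : List Int) (j prev : Int)
    (h1 : 0 < j - prev - 1) (h2 : win_amount ≤ j - prev - 1) :
    zipAny win_amount (blockerIdxs turn xs j ++ [j + (xs.length : Int)]) prev = true := by
  rcases hb : blockerIdxs turn xs j with _ | ⟨b, rest⟩
  · simp [zipAny]
    constructor <;> omega
  · have hjb : j ≤ b := blockerIdxs_ge turn xs j b (by rw [hb]; exact List.mem_cons_self ..)
    simp [zipAny]
    left
    constructor <;> omega

-- main invariant: prev is the index of the last blocker, count = i - prev - 1 the running count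
theorem main_inv (turn win_amount : Int) (xs : List Int) :
    ∀ (i prev : Int), 0 ≤ i - prev - 1 → (i - prev - 1 = 0 ∨ i - prev - 1 < win_amount) →
      zipAny win_amount (blockerIdxs turn xs i ++ [i + (xs.length : Int)]) prev
        = checkGo turn win_amount xs (i - prev - 1) := by
  induction xs with
  | nil =>
    intro i prev h0 hlt
    simp [blockerIdxs, zipAny, checkGo]
    intro h; omega
  | cons x xs ih =>
    intro i prev h0 hlt
    have hlen : i + ((x :: xs).length : Int) = (i + 1) + (xs.length : Int) := by
      simp only [List.length_cons]; push_cast; ring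
    by_cases hx : x = turn
    · have hb : blockerIdxs turn (x :: xs) i = blockerIdxs turn xs (i + 1) := by
        simp [blockerIdxs, hx]
      rw [hb, hlen]
      simp only [checkGo, if_pos hx]
      by_cases hw : i - prev - 1 + 1 ≥ win_amount
      · rw [if_pos hw]
        exact zipAny_big turn win_amount xs (i + 1) prev (by omega) (by omega)
      · rw [if_neg hw]
        have := ih (i + 1) prev (by omega) (by omega)
        have he : (i + 1) - prev - 1 = i - prev - 1 + 1 := by omega
        rw [he] at this
        exact this
    · have hb : blockerIdxs turn (x :: xs) i = i :: blockerIdxs turn xs (i + 1) := by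
        simp [blockerIdxs, hx]
      rw [hb, hlen]
      simp only [checkGo, if_neg hx, List.cons_append, zipAny]
      have hpred : (decide (0 < i - prev - 1) && decide (win_amount ≤ i - prev - 1)) = false := by
        simp; intro h; omega
      rw [hpred, Bool.false_or]
      have := ih (i + 1) i (by omega) (by omega)
      have he : (i + 1) - i - 1 = 0 := by omega
      rw [he] at this
      exact this

theorem alt_eq (line : List Int) (turn win_amount : Int) :
    check_win_in_row_alt line turn win_amount
      = zipAny win_amount (blockerIdxs turn line 0 ++ [(line.length : Int)]) (-1) := by
  exact zip_any_eq_zipAny win_amount (blockerIdxs turn line 0 ++ [(line.length : Int)]) (-1)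

-- ===== VERDICT (by name: the statement is the Claim_ definition above) =====
theorem check_win_in_row_spec : Claim_equal_check_win_in_row := by
  intro line turn win_amount _
  unfold Spec_check_win_in_row check_win_in_row
  rw [alt_eq]
  have := main_inv turn win_amount line 0 (-1) (by omega) (by omega)
  have he : (0 : Int) - (-1) - 1 = 0 := by omega
  rw [he] at this
  rw [show (0 : Int) + (line.length : Int) = (line.length : Int) by ring] at this
  exact this.symm
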